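-- pv_equiv track=rewrite | github.com/su-ram/Problem-Solving | 프로그래머스/백엔드_데브매칭3.py | pop_candy
-- ===== SOURCE A (Python) =====
-- from collections import deque
--
-- def pop_candy(start, board, totalvisit):
--     color = board[start[0]][start[1]]
--     q = deque([start])
--     dx = [0,0,-1,1]
--     dy = [-1,1,0,0]
--     visited = set([start])
--
--     while q:
--         x,y = q.popleft()
--         for d in range(4):
--             nx = x + dx[d]
--             ny = y + dy[d]
--             if 1<=nx<=6 and 1<=ny<=6 and board[nx][ny] == color and (nx,ny) not in visited:
--                 q.append((nx,ny))
--                 visited.add((nx,ny))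
--
--     if len(visited) >=3 :
--         for x, y in visited:
--             board[x][y] = 0
--
--         for i in range(1, 7):
--             m = []
--             for j in range(6, 0, -1):
--                 if board[j][i] > 0:
--                     m.append(board[j][i])
--             for j in range(len(m)):
--                 board[6-j][i] = m[j]
--             for j in range(6-len(m),0, -1):
--                 board[j][i] = 0
--
--         return True
--     return False
-- ===== SOURCE B (Python) =====
-- def pop_candy(start, board, totalvisit):
--     color = board[start[0]][start[1]]
--     visited = {start}
--
--     def fill(x, y):
--         if 1 <= x <= 6 and 1 <= y <= 6 and board[x][y] == color and (x, y) not in visited: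
--             visited.add((x, y))
--             fill(x, y - 1)
--             fill(x, y + 1)
--             fill(x - 1, y)
--             fill(x + 1, y)
--
--     sx, sy = start
--     fill(sx, sy - 1)
--     fill(sx, sy + 1)
--     fill(sx - 1, sy)
--     fill(sx + 1, sy)
--
--     if len(visited) < 3:
--         return False
--
--     for x, y in visited:
--         board[x][y] = 0
--
--     for i in range(1, 7):
--         stack = [board[j][i] for j in range(6, 0, -1) if board[j][i] > 0]
--         for k in range(1, 7):
--             board[7 - k][i] = stack[k - 1] if k - 1 < len(stack) else 0
--     return True
-- ===== Notes on version B (the rewrite author's own statement) =====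
-- stated objective: alternative
-- what changed: Replaces the deque-based BFS flood fill by a recursive depth-first flood-fill helper (no explicit queue or stack) and rebuilds each column's gravity in one bottom-up comprehension pass instead of three index loops.
-- outside the precondition, e.g. on pop_candy((1, 1), [[0], [0, 5, 5, 0, 0, 0, 0], [0, 9, 9]], set()): A returns False, B returns False
import Mathlib
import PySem

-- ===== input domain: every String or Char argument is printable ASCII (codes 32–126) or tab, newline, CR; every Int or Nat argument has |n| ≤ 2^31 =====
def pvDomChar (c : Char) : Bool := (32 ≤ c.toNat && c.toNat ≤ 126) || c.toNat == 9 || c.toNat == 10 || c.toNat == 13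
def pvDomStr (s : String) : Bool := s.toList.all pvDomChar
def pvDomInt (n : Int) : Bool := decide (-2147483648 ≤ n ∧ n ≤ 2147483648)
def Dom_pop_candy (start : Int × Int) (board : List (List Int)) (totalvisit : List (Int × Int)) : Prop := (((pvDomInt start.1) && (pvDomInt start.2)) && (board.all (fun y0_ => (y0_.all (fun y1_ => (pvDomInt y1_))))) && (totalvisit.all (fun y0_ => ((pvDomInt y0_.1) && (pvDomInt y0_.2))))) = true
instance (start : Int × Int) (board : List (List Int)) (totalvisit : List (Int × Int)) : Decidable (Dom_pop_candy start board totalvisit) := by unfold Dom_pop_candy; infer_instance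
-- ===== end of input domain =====

-- B replaces A's deque-based BFS flood fill by a recursive depth-first flood fill and rebuilds
-- each column's gravity bottom-up in one pass (objective: alternative decomposition, same cost).
-- Both Pythons mutate `board` in place in exactly the same way (tested); the equivalence proved
-- here is about the returned Bool only — the ports do not model the in-place mutation.

-- ===== PORT A =====
-- board[x][y] as Python computes it (negative indices wrap; none = IndexError)
def pvCell (board : List (List Int)) (x y : Int) : Option Int :=
  (PySem.List.pyGet? board x).bind (fun row => PySem.List.pyGet? row y)

-- the (dx[d], dy[d]) pairs of A's direction tables, in d = 0,1,2,3 order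
def pvDeltas : List (Int × Int) := [(0, -1), (0, 1), (-1, 0), (1, 0)]

-- body of A's `for d in range(4)` loop: test the neighbour, append it to the queue and visited set
def pvBfsStep (board : List (List Int)) (color x y : Int)
    (st : List (Int × Int) × PySem.Set (Int × Int)) (d : Int × Int) :
    List (Int × Int) × PySem.Set (Int × Int) :=
  if 1 ≤ x + d.1 ∧ x + d.1 ≤ 6 ∧ 1 ≤ y + d.2 ∧ y + d.2 ≤ 6 ∧
      pvCell board (x + d.1) (y + d.2) = some color ∧ (x + d.1, y + d.2) ∉ st.2 then
    (st.1 ++ [(x + d.1, y + d.2)], PySem.Set.add st.2 (x + d.1, y + d.2))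
  else st

-- A's `while q:` loop (fuel only makes it total; ≤ 37 iterations ever happen, see pvBfs_main)
def pvBfsLoop (board : List (List Int)) (color : Int) :
    Nat → List (Int × Int) → PySem.Set (Int × Int) → PySem.Set (Int × Int)
  | 0, _, v => v
  | _ + 1, [], v => v
  | f + 1, c :: q, v =>
    let st := pvDeltas.foldl (pvBfsStep board color c.1 c.2) (q, v)
    pvBfsLoop board color f st.1 st.2

def pop_candy (start : Int × Int) (board : List (List Int)) (totalvisit : List (Int × Int)) : Bool :=
  match pvCell board start.1 start.2 with
  | none => false   -- Python raises IndexError here; excluded by Pre_pop_candy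
  | some color =>
      let visited := pvBfsLoop board color 100 [start] (PySem.Set.ofList [start])
      decide (3 ≤ PySem.Set.len visited)

-- ===== PORT B =====
-- B's recursive flood-fill helper `fill` (fuel only makes it total; depth ≤ 36, see pvFill_main)
def pvFill (board : List (List Int)) (color : Int) :
    Nat → Int → Int → PySem.Set (Int × Int) → PySem.Set (Int × Int)
  | 0, _, _, v => v
  | f + 1, x, y, v =>
    if 1 ≤ x ∧ x ≤ 6 ∧ 1 ≤ y ∧ y ≤ 6 ∧ pvCell board x y = some color ∧ (x, y) ∉ v then
      let v1 := PySem.Set.add v (x, y)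
      let v2 := pvFill board color f x (y - 1) v1
      let v3 := pvFill board color f x (y + 1) v2
      let v4 := pvFill board color f (x - 1) y v3
      pvFill board color f (x + 1) y v4
    else v

def pop_candy_alt (start : Int × Int) (board : List (List Int)) (totalvisit : List (Int × Int)) : Bool :=
  match pvCell board start.1 start.2 with
  | none => false   -- Python raises IndexError here; excluded by Pre_pop_candy
  | some color =>
      let v0 := PySem.Set.ofList [start]
      let v1 := pvFill board color 37 start.1 (start.2 - 1) v0
      let v2 := pvFill board color 37 start.1 (start.2 + 1) v1
      let v3 := pvFill board color 37 (start.1 - 1) start.2 v2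
      let v4 := pvFill board color 37 (start.1 + 1) start.2 v3
      if PySem.Set.len v4 < 3 then false else true

-- ===== PRECONDITION & SPEC =====
-- Pre_ excludes the inputs where Python A raises IndexError: start must index the board (Python
-- wraparound included), and whenever start touches the 1..6 neighbourhood the board must either
-- carry the full 7×7 area (so every row the flood fill or the gravity pass may read exists) or
-- all in-grid neighbours of start must exist and hold a colour other than start's (so the flood
-- fill stops at start and reads nothing else).  This still slightly over-excludes: which other
-- short-row boards A happens to survive depends on the flood fill's path and is not a
-- closed-form condition on the input.
def Pre_pop_candy (start : Int × Int) (board : List (List Int)) (totalvisit : List (Int × Int)) : Prop :=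
  (∃ row ∈ (PySem.List.pyGet? board start.1).toList, PySem.Raise.InRange row.length start.2) ∧
  (((1 ≤ start.1 ∧ start.1 ≤ 6 ∧ 0 ≤ start.2 ∧ start.2 ≤ 7) ∨
    (1 ≤ start.2 ∧ start.2 ≤ 6 ∧ 0 ≤ start.1 ∧ start.1 ≤ 7)) →
   ((7 ≤ board.length ∧ ∀ row ∈ (board.drop 1).take 6, 7 ≤ row.length) ∨
    (∀ n ∈ [(start.1, start.2 - 1), (start.1, start.2 + 1),
            (start.1 - 1, start.2), (start.1 + 1, start.2)],
      1 ≤ n.1 → n.1 ≤ 6 → 1 ≤ n.2 → n.2 ≤ 6 →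
      ((PySem.List.pyGet? board n.1).bind (fun row => PySem.List.pyGet? row n.2) ≠ none ∧
       (PySem.List.pyGet? board n.1).bind (fun row => PySem.List.pyGet? row n.2) ≠
         (PySem.List.pyGet? board start.1).bind (fun row => PySem.List.pyGet? row start.2)))))
instance (start : Int × Int) (board : List (List Int)) (totalvisit : List (Int × Int)) : Decidable (Pre_pop_candy start board totalvisit) := by unfold Pre_pop_candy; infer_instance

def pvWitness_pop_candy : (Int × Int) × List (List Int) × (List (Int × Int)) :=
  ((1, 1),
   [[0, 0, 0, 0, 0, 0, 0],
    [0, 2, 2, 0, 0, 0, 0],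
    [0, 2, 0, 0, 0, 0, 0],
    [0, 0, 0, 0, 0, 0, 0],
    [0, 0, 0, 0, 0, 0, 0],
    [0, 0, 0, 0, 0, 0, 0],
    [0, 0, 0, 0, 0, 0, 0]],
   [])

def Spec_pop_candy (start : Int × Int) (board : List (List Int)) (totalvisit : List (Int × Int)) (out : Bool) : Prop := out = pop_candy_alt start board totalvisit
instance (start : Int × Int) (board : List (List Int)) (totalvisit : List (Int × Int)) (out : Bool) : Decidable (Spec_pop_candy start board totalvisit out) := by unfold Spec_pop_candy; infer_instance

-- ===== CLAIM (what is proved, stated in full; the proofs are below) =====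
def Claim_equal_pop_candy : Prop := ∀ (start : Int × Int) (board : List (List Int)) (totalvisit : List (Int × Int)), Dom_pop_candy start board totalvisit → Pre_pop_candy start board totalvisit → Spec_pop_candy start board totalvisit (pop_candy start board totalvisit)

-- ===== LEMMAS AND PROOFS =====

-- "cell c is a same-coloured candy inside the 6×6 play area"
def pvGoodb (board : List (List Int)) (color : Int) (c : Int × Int) : Bool :=
  decide (1 ≤ c.1 ∧ c.1 ≤ 6 ∧ 1 ≤ c.2 ∧ c.2 ≤ 6 ∧ pvCell board c.1 c.2 = some color)

-- the four grid neighbours of a cell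
def pvNbrs (c : Int × Int) : List (Int × Int) :=
  pvDeltas.map (fun d => (c.1 + d.1, c.2 + d.2))

lemma mem_pvNbrs (c n : Int × Int) :
    n ∈ pvNbrs c ↔ n = (c.1, c.2 - 1) ∨ n = (c.1, c.2 + 1) ∨ n = (c.1 - 1, c.2) ∨ n = (c.1 + 1, c.2) := by
  simp [pvNbrs, pvDeltas, Prod.ext_iff]
  omega

-- cells reachable from start through same-coloured in-grid neighbours
inductive pvReach (board : List (List Int)) (color : Int) (start : Int × Int) : Int × Int → Prop
  | base : pvReach board color start start
  | step {c n : Int × Int} : pvReach board color start c → n ∈ pvNbrs c →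
      pvGoodb board color n = true → pvReach board color start n

-- the 6×6 play area as a list of cells
def pvGrid : List (Int × Int) :=
  ([1, 2, 3, 4, 5, 6] : List Int).flatMap
    (fun i => ([1, 2, 3, 4, 5, 6] : List Int).map (fun j => (i, j)))

lemma mem_pvGrid (a : Int × Int) :
    a ∈ pvGrid ↔ 1 ≤ a.1 ∧ a.1 ≤ 6 ∧ 1 ≤ a.2 ∧ a.2 ≤ 6 := by
  have h : ∀ x : Int, x ∈ ([1, 2, 3, 4, 5, 6] : List Int) ↔ 1 ≤ x ∧ x ≤ 6 := by
    intro x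
    simp only [List.mem_cons, List.not_mem_nil, or_false]
    omega
  simp only [pvGrid, List.mem_flatMap, List.mem_map]
  constructor
  · rintro ⟨i, hi, j, hj, rfl⟩
    exact ⟨(h i).mp hi |>.1, (h i).mp hi |>.2, (h j).mp hj |>.1, (h j).mp hj |>.2⟩
  · rintro ⟨h1, h2, h3, h4⟩
    exact ⟨a.1, (h a.1).mpr ⟨h1, h2⟩, a.2, (h a.2).mpr ⟨h3, h4⟩, rfl⟩

-- the finite set of good cells (⊆ 6×6 grid)
def pvS (board : List (List Int)) (color : Int) : Finset (Int × Int) :=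
  pvGrid.toFinset.filter (fun c => pvGoodb board color c = true)

lemma mem_pvS (board : List (List Int)) (color : Int) (a : Int × Int) :
    a ∈ pvS board color ↔ pvGoodb board color a = true := by
  simp only [pvS, Finset.mem_filter, List.mem_toFinset, mem_pvGrid]
  constructor
  · exact fun h => h.2
  · intro h
    have hb := h
    simp only [pvGoodb, decide_eq_true_eq] at hb
    exact ⟨⟨hb.1, hb.2.1, hb.2.2.1, hb.2.2.2.1⟩, h⟩

lemma card_pvS_le (board : List (List Int)) (color : Int) : (pvS board color).card ≤ 36 := by
  calc (pvS board color).card ≤ pvGrid.toFinset.card := Finset.card_filter_le _ _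
    _ ≤ pvGrid.length := pvGrid.toFinset_card_le
    _ = 36 := by rfl

lemma pv_toFinset_add (s : PySem.Set (Int × Int)) (x : Int × Int) :
    (s.add x).toFinset = insert x s.toFinset := by
  ext a
  simp [PySem.Set.mem_add (s := s) (x := x) (y := a), or_comm]

lemma pv_card_mono (board : List (List Int)) (color : Int)
    (s t : PySem.Set (Int × Int)) (h : ∀ a, a ∈ s → a ∈ t) :
    (pvS board color \ t.toFinset).card ≤ (pvS board color \ s.toFinset).card := by
  apply Finset.card_le_card
  apply Finset.sdiff_subset_sdiff (Finset.Subset.refl _)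
  intro a ha
  exact List.mem_toFinset.mpr (h a (List.mem_toFinset.mp ha))

-- everything the inner `for d in range(4)` fold guarantees, in one bundle
lemma pvFold_facts (board : List (List Int)) (color x y : Int) (ds : List (Int × Int)) :
    ∀ (q : List (Int × Int)) (v : PySem.Set (Int × Int)),
    (∀ a, a ∈ v → a ∈ (ds.foldl (pvBfsStep board color x y) (q, v)).2) ∧
    (∀ a, a ∈ q → a ∈ (ds.foldl (pvBfsStep board color x y) (q, v)).1) ∧
    (∀ a, a ∈ (ds.foldl (pvBfsStep board color x y) (q, v)).2 →
      a ∈ v ∨ (a ∈ ds.map (fun d => (x + d.1, y + d.2)) ∧ pvGoodb board color a = true)) ∧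
    (∀ d, d ∈ ds → pvGoodb board color (x + d.1, y + d.2) = true →
      (x + d.1, y + d.2) ∈ (ds.foldl (pvBfsStep board color x y) (q, v)).2) ∧
    (∀ a, a ∈ (ds.foldl (pvBfsStep board color x y) (q, v)).1 →
      a ∈ q ∨ a ∈ (ds.foldl (pvBfsStep board color x y) (q, v)).2) ∧
    (∀ a, a ∈ (ds.foldl (pvBfsStep board color x y) (q, v)).2 →
      a ∈ v ∨ a ∈ (ds.foldl (pvBfsStep board color x y) (q, v)).1) ∧
    (v.Nodup → (ds.foldl (pvBfsStep board color x y) (q, v)).2.Nodup) ∧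
    ((ds.foldl (pvBfsStep board color x y) (q, v)).1.length +
        2 * (pvS board color \ (ds.foldl (pvBfsStep board color x y) (q, v)).2.toFinset).card ≤
      q.length + 2 * (pvS board color \ v.toFinset).card) := by
  induction ds with
  | nil =>
      intro q v
      exact ⟨fun a h => h, fun a h => h, fun a h => Or.inl h, by simp, fun a h => Or.inl h,
        fun a h => Or.inl h, fun h => h, le_refl _⟩
  | cons d ds ih =>
      intro q v
      by_cases h : 1 ≤ x + d.1 ∧ x + d.1 ≤ 6 ∧ 1 ≤ y + d.2 ∧ y + d.2 ≤ 6 ∧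
          pvCell board (x + d.1) (y + d.2) = some color ∧ (x + d.1, y + d.2) ∉ v
      · have hstep : pvBfsStep board color x y (q, v) d =
            (q ++ [(x + d.1, y + d.2)], PySem.Set.add v (x + d.1, y + d.2)) := by
          simp only [pvBfsStep]
          exact if_pos h
        have hg : pvGoodb board color (x + d.1, y + d.2) = true := by
          simp only [pvGoodb, decide_eq_true_eq]
          exact ⟨h.1, h.2.1, h.2.2.1, h.2.2.2.1, h.2.2.2.2.1⟩
        have hnv : (x + d.1, y + d.2) ∉ v := h.2.2.2.2.2
        rw [List.foldl_cons, hstep]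
        obtain ⟨I1, I2, I3, I4, I5, I6, I7, I8⟩ := ih (q ++ [(x + d.1, y + d.2)])
          (PySem.Set.add v (x + d.1, y + d.2))
        refine ⟨?_, ?_, ?_, ?_, ?_, ?_, ?_, ?_⟩
        · intro a ha
          exact I1 a ((PySem.Set.mem_add _ _ _).mpr (Or.inl ha))
        · intro a ha
          exact I2 a (List.mem_append.mpr (Or.inl ha))
        · intro a ha
          rcases I3 a ha with hv | ⟨hm, hga⟩
          · rcases (PySem.Set.mem_add _ _ _).mp hv with hv' | rfl
            · exact Or.inl hv'
            · exact Or.inr ⟨by simp, hg⟩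
          · exact Or.inr ⟨by simp only [List.map_cons, List.mem_cons]; exact Or.inr hm, hga⟩
        · intro d' hd' hgd'
          rcases List.mem_cons.mp hd' with rfl | hd'
          · exact I1 _ ((PySem.Set.mem_add _ _ _).mpr (Or.inr rfl))
          · exact I4 d' hd' hgd'
        · intro a ha
          rcases I5 a ha with hq | h2
          · rcases List.mem_append.mp hq with hq' | hn
            · exact Or.inl hq'
            · simp only [List.mem_singleton] at hn
              subst hn
              exact Or.inr (I1 _ ((PySem.Set.mem_add _ _ _).mpr (Or.inr rfl)))
          · exact Or.inr h2
        · intro a ha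
          rcases I6 a ha with hv | h1
          · rcases (PySem.Set.mem_add _ _ _).mp hv with hv' | rfl
            · exact Or.inl hv'
            · exact Or.inr (I2 _ (List.mem_append.mpr (Or.inr (by simp))))
          · exact Or.inr h1
        · intro hn
          exact I7 (PySem.Set.nodup_add _ _ hn)
        · have hnS : (x + d.1, y + d.2) ∈ pvS board color := (mem_pvS _ _ _).mpr hg
          have hmem : (x + d.1, y + d.2) ∈ pvS board color \ v.toFinset :=
            Finset.mem_sdiff.mpr ⟨hnS, fun hc => hnv (List.mem_toFinset.mp hc)⟩
          have hcard : (pvS board color \ (PySem.Set.add v (x + d.1, y + d.2)).toFinset).card =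
              (pvS board color \ v.toFinset).card - 1 := by
            rw [pv_toFinset_add, Finset.sdiff_insert, Finset.card_erase_of_mem hmem]
          have hpos : 1 ≤ (pvS board color \ v.toFinset).card :=
            Finset.card_pos.mpr ⟨_, hmem⟩
          have hlen : (q ++ [(x + d.1, y + d.2)]).length = q.length + 1 := by simp
          omega
      · have hstep : pvBfsStep board color x y (q, v) d = (q, v) := by
          simp only [pvBfsStep]
          exact if_neg h
        rw [List.foldl_cons, hstep]
        obtain ⟨I1, I2, I3, I4, I5, I6, I7, I8⟩ := ih q v
        refine ⟨I1, I2, ?_, ?_, I5, I6, I7, I8⟩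
        · intro a ha
          rcases I3 a ha with hv | ⟨hm, hga⟩
          · exact Or.inl hv
          · exact Or.inr ⟨by simp only [List.map_cons, List.mem_cons]; exact Or.inr hm, hga⟩
        · intro d' hd' hgd'
          rcases List.mem_cons.mp hd' with rfl | hd'
          · -- the condition failed although the neighbour is good: it must already be visited
            have hv : (x + d'.1, y + d'.2) ∈ v := by
              by_contra hc
              simp only [pvGoodb, decide_eq_true_eq] at hgd'
              exact h ⟨hgd'.1, hgd'.2.1, hgd'.2.2.1, hgd'.2.2.2.1, hgd'.2.2.2.2, hc⟩
            exact I1 _ hv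
          · exact I4 d' hd' hgd'

-- the BFS loop: monotone, nodup-preserving, sound for membership, and — because the measure
-- `|q| + 2·|S \ v|` bounds the fuel — it drains the queue and leaves a neighbour-closed set
lemma pvBfs_main (board : List (List Int)) (color : Int) :
    ∀ (f : Nat) (q : List (Int × Int)) (v : PySem.Set (Int × Int)),
    v.Nodup →
    (∀ a, a ∈ q → a ∈ v) →
    (∀ a, a ∈ v → a ∈ q ∨ (∀ n, n ∈ pvNbrs a → pvGoodb board color n = true → n ∈ v)) →
    q.length + 2 * (pvS board color \ v.toFinset).card ≤ f →
    (∀ a, a ∈ v → a ∈ pvBfsLoop board color f q v) ∧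
    (pvBfsLoop board color f q v).Nodup ∧
    (∀ a, a ∈ pvBfsLoop board color f q v → a ∈ v ∨ pvGoodb board color a = true) ∧
    (∀ a, a ∈ pvBfsLoop board color f q v →
      ∀ n, n ∈ pvNbrs a → pvGoodb board color n = true → n ∈ pvBfsLoop board color f q v) := by
  intro f
  induction f with
  | zero =>
      intro q v hnd h1 h2 hμ
      have hq : q = [] := List.eq_nil_of_length_eq_zero (by omega)
      subst hq
      refine ⟨fun a h => h, hnd, fun a h => Or.inl h, ?_⟩
      intro a ha n hn hg
      rcases h2 a ha with hq | hcl
      · exact absurd hq (List.not_mem_nil)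
      · exact hcl n hn hg
  | succ f IH =>
      intro q v hnd h1 h2 hμ
      match q with
      | [] =>
          refine ⟨fun a h => h, hnd, fun a h => Or.inl h, ?_⟩
          intro a ha n hn hg
          rcases h2 a ha with hq | hcl
          · exact absurd hq (List.not_mem_nil)
          · exact hcl n hn hg
      | c :: q' =>
          obtain ⟨F1, F2, F3, F4, F5, F6, F7, F8⟩ :=
            pvFold_facts board color c.1 c.2 pvDeltas q' v
          set st := pvDeltas.foldl (pvBfsStep board color c.1 c.2) (q', v) with hst
          have hloop : pvBfsLoop board color (f + 1) (c :: q') v =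
              pvBfsLoop board color f st.1 st.2 := rfl
          have hnbrs : ∀ n, n ∈ pvNbrs c ↔ n ∈ pvDeltas.map (fun d => (c.1 + d.1, c.2 + d.2)) := by
            intro n; rfl
          obtain ⟨G1, G2, G3, G4⟩ := IH st.1 st.2
            (F7 hnd)
            (by
              intro a ha
              rcases F5 a ha with hq | h2'
              · exact F1 a (h1 a (List.mem_cons.mpr (Or.inr hq)))
              · exact h2')
            (by
              intro a ha
              rcases F6 a ha with hv | hq1
              · rcases h2 a hv with hq | hcl
                · rcases List.mem_cons.mp hq with rfl | hq'
                  · refine Or.inr ?_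
                    intro n hn hg
                    rw [hnbrs] at hn
                    rcases List.mem_map.mp hn with ⟨d, hd, rfl⟩
                    exact F4 d hd hg
                  · exact Or.inl (F2 a hq')
                · exact Or.inr (fun n hn hg => F1 n (hcl n hn hg))
              · exact Or.inl hq1)
            (by
              have : (c :: q').length = q'.length + 1 := rfl
              omega)
          rw [hloop]
          refine ⟨fun a ha => G1 a (F1 a ha), G2, ?_, G4⟩
          intro a ha
          rcases G3 a ha with h2' | hg
          · rcases F3 a h2' with hv | ⟨_, hga⟩
            · exact Or.inl hv
            · exact Or.inr hga
          · exact Or.inr hg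

-- everything the BFS loop ever visits is reachable
lemma pvBfs_sound (board : List (List Int)) (color : Int) (start : Int × Int) :
    ∀ (f : Nat) (q : List (Int × Int)) (v : PySem.Set (Int × Int)),
    (∀ a, a ∈ q → pvReach board color start a) →
    (∀ a, a ∈ v → pvReach board color start a) →
    ∀ a, a ∈ pvBfsLoop board color f q v → pvReach board color start a := by
  intro f
  induction f with
  | zero =>
      intro q v _ hv a ha
      exact hv a ha
  | succ f IH =>
      intro q v hq hv a ha
      match q with
      | [] => exact hv a ha
      | c :: q' =>
          obtain ⟨F1, F2, F3, F4, F5, F6, F7, F8⟩ :=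
            pvFold_facts board color c.1 c.2 pvDeltas q' v
          set st := pvDeltas.foldl (pvBfsStep board color c.1 c.2) (q', v) with hst
          have hloop : pvBfsLoop board color (f + 1) (c :: q') v =
              pvBfsLoop board color f st.1 st.2 := rfl
          rw [hloop] at ha
          have hreach_c : pvReach board color start c := hq c (List.mem_cons_self)
          have hv' : ∀ b, b ∈ st.2 → pvReach board color start b := by
            intro b hb
            rcases F3 b hb with hbv | ⟨hm, hg⟩
            · exact hv b hbv
            · exact pvReach.step hreach_c hm hg
          refine IH st.1 st.2 ?_ hv' a ha
          intro b hb
          rcases F5 b hb with hbq | hb2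
          · exact hq b (List.mem_cons.mpr (Or.inr hbq))
          · exact hv' b hb2

-- the recursive flood fill: monotone, nodup-preserving, it visits a good target, only adds good
-- cells, and every cell it adds ends up neighbour-closed (fuel bounded below by `|S \ v| + 1`)
lemma pvFill_main (board : List (List Int)) (color : Int) :
    ∀ (f : Nat) (x y : Int) (v : PySem.Set (Int × Int)),
    v.Nodup → (pvS board color \ v.toFinset).card < f →
    (∀ a, a ∈ v → a ∈ pvFill board color f x y v) ∧
    (pvFill board color f x y v).Nodup ∧
    (pvGoodb board color (x, y) = true → (x, y) ∈ pvFill board color f x y v) ∧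
    (∀ a, a ∈ pvFill board color f x y v → a ∈ v ∨ pvGoodb board color a = true) ∧
    (∀ a, a ∈ pvFill board color f x y v → a ∉ v →
      ∀ n, n ∈ pvNbrs a → pvGoodb board color n = true → n ∈ pvFill board color f x y v) := by
  intro f
  induction f with
  | zero =>
      intro x y v _ hμ
      omega
  | succ f IH =>
      intro x y v hnd hμ
      by_cases h : 1 ≤ x ∧ x ≤ 6 ∧ 1 ≤ y ∧ y ≤ 6 ∧ pvCell board x y = some color ∧ (x, y) ∉ v
      · have hg : pvGoodb board color (x, y) = true := by
          simp only [pvGoodb, decide_eq_true_eq]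
          exact ⟨h.1, h.2.1, h.2.2.1, h.2.2.2.1, h.2.2.2.2.1⟩
        have hnv : (x, y) ∉ v := h.2.2.2.2.2
        have hunf : pvFill board color (f + 1) x y v =
            pvFill board color f (x + 1) y
              (pvFill board color f (x - 1) y
                (pvFill board color f x (y + 1)
                  (pvFill board color f x (y - 1) (PySem.Set.add v (x, y))))) := by
          simp only [pvFill]
          rw [if_pos h]
        set w1 := PySem.Set.add v (x, y) with hw1
        have hmem : (x, y) ∈ pvS board color \ v.toFinset :=
          Finset.mem_sdiff.mpr ⟨(mem_pvS _ _ _).mpr hg, fun hc => hnv (List.mem_toFinset.mp hc)⟩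
        have hcard1 : (pvS board color \ w1.toFinset).card =
            (pvS board color \ v.toFinset).card - 1 := by
          rw [hw1, pv_toFinset_add, Finset.sdiff_insert, Finset.card_erase_of_mem hmem]
        have hpos : 1 ≤ (pvS board color \ v.toFinset).card := Finset.card_pos.mpr ⟨_, hmem⟩
        have hnd1 : w1.Nodup := PySem.Set.nodup_add _ _ hnd
        obtain ⟨A1, A2, A3, A4, A5⟩ := IH x (y - 1) w1 hnd1 (by omega)
        set w2 := pvFill board color f x (y - 1) w1 with hw2
        obtain ⟨B1, B2, B3, B4, B5⟩ := IH x (y + 1) w2 A2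
          (lt_of_le_of_lt (pv_card_mono board color w1 w2 A1) (by omega))
        set w3 := pvFill board color f x (y + 1) w2 with hw3
        obtain ⟨C1, C2, C3, C4, C5⟩ := IH (x - 1) y w3 B2
          (lt_of_le_of_lt (pv_card_mono board color w1 w3 (fun a ha => B1 a (A1 a ha))) (by omega))
        set w4 := pvFill board color f (x - 1) y w3 with hw4
        obtain ⟨D1, D2, D3, D4, D5⟩ := IH (x + 1) y w4 C2
          (lt_of_le_of_lt
            (pv_card_mono board color w1 w4 (fun a ha => C1 a (B1 a (A1 a ha)))) (by omega))
        rw [hunf]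
        have hmono1 : ∀ a, a ∈ w1 → a ∈ pvFill board color f (x + 1) y w4 :=
          fun a ha => D1 a (C1 a (B1 a (A1 a ha)))
        refine ⟨?_, D2, ?_, ?_, ?_⟩
        · intro a ha
          exact hmono1 a ((PySem.Set.mem_add _ _ _).mpr (Or.inl ha))
        · intro _
          exact hmono1 (x, y) ((PySem.Set.mem_add _ _ _).mpr (Or.inr rfl))
        · intro a ha
          rcases D4 a ha with ha4 | hga
          · rcases C4 a ha4 with ha3 | hga
            · rcases B4 a ha3 with ha2 | hga
              · rcases A4 a ha2 with ha1 | hga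
                · rcases (PySem.Set.mem_add _ _ _).mp ha1 with hav | rfl
                  · exact Or.inl hav
                  · exact Or.inr hg
                · exact Or.inr hga
              · exact Or.inr hga
            · exact Or.inr hga
          · exact Or.inr hga
        · intro a ha hav n hn hgn
          by_cases hax : a = (x, y)
          · subst hax
            rcases (mem_pvNbrs _ n).mp hn with rfl | rfl | rfl | rfl
            · exact D1 _ (C1 _ (B1 _ (A3 hgn)))
            · exact D1 _ (C1 _ (B3 hgn))
            · exact D1 _ (C3 hgn)
            · exact D3 hgn
          · have ha1 : a ∉ w1 := by
              rw [hw1]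
              intro hc
              rcases (PySem.Set.mem_add _ _ _).mp hc with hc' | hc'
              · exact hav hc'
              · exact hax hc'
            by_cases ha2 : a ∈ w2
            · exact D1 _ (C1 _ (B1 _ (A5 a ha2 ha1 n hn hgn)))
            · by_cases ha3 : a ∈ w3
              · exact D1 _ (C1 _ (B5 a ha3 ha2 n hn hgn))
              · by_cases ha4 : a ∈ w4
                · exact D1 _ (C5 a ha4 ha3 n hn hgn)
                · exact D5 a ha ha4 n hn hgn
      · have hunf : pvFill board color (f + 1) x y v = v := by
          simp only [pvFill]
          rw [if_neg h]
        rw [hunf]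
        refine ⟨fun a ha => ha, hnd, ?_, fun a ha => Or.inl ha, ?_⟩
        · intro hg
          by_contra hc
          simp only [pvGoodb, decide_eq_true_eq] at hg
          exact h ⟨hg.1, hg.2.1, hg.2.2.1, hg.2.2.2.1, hg.2.2.2.2, hc⟩
        · intro a ha hav
          exact absurd ha hav
  
-- everything the recursive flood fill ever visits is reachable
lemma pvFill_sound (board : List (List Int)) (color : Int) (start : Int × Int) :
    ∀ (f : Nat) (x y : Int) (v : PySem.Set (Int × Int)),
    (∀ a, a ∈ v → pvReach board color start a) →
    (pvGoodb board color (x, y) = true → pvReach board color start (x, y)) →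
    ∀ a, a ∈ pvFill board color f x y v → pvReach board color start a := by
  intro f
  induction f with
  | zero =>
      intro x y v hv _ a ha
      exact hv a ha
  | succ f IH =>
      intro x y v hv hxy a ha
      by_cases h : 1 ≤ x ∧ x ≤ 6 ∧ 1 ≤ y ∧ y ≤ 6 ∧ pvCell board x y = some color ∧ (x, y) ∉ v
      · have hg : pvGoodb board color (x, y) = true := by
          simp only [pvGoodb, decide_eq_true_eq]
          exact ⟨h.1, h.2.1, h.2.2.1, h.2.2.2.1, h.2.2.2.2.1⟩
        have hrxy : pvReach board color start (x, y) := hxy hg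
        have hunf : pvFill board color (f + 1) x y v =
            pvFill board color f (x + 1) y
              (pvFill board color f (x - 1) y
                (pvFill board color f x (y + 1)
                  (pvFill board color f x (y - 1) (PySem.Set.add v (x, y))))) := by
          simp only [pvFill]
          rw [if_pos h]
        rw [hunf] at ha
        have h1 : ∀ b, b ∈ PySem.Set.add v (x, y) → pvReach board color start b := by
          intro b hb
          rcases (PySem.Set.mem_add _ _ _).mp hb with hb' | rfl
          · exact hv b hb'
          · exact hrxy
        have hstep : ∀ n, n ∈ pvNbrs (x, y) → pvGoodb board color n = true →
            pvReach board color start n := fun n hn hgn => pvReach.step hrxy hn hgn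
        have h2 := IH x (y - 1) _ h1
          (fun hg' => hstep _ ((mem_pvNbrs _ _).mpr (Or.inl rfl)) hg')
        have h3 := IH x (y + 1) _ (fun b hb => h2 b hb)
          (fun hg' => hstep _ ((mem_pvNbrs _ _).mpr (Or.inr (Or.inl rfl))) hg')
        have h4 := IH (x - 1) y _ (fun b hb => h3 b hb)
          (fun hg' => hstep _ ((mem_pvNbrs _ _).mpr (Or.inr (Or.inr (Or.inl rfl)))) hg')
        exact IH (x + 1) y _ (fun b hb => h4 b hb)
          (fun hg' => hstep _ ((mem_pvNbrs _ _).mpr (Or.inr (Or.inr (Or.inr rfl)))) hg') a ha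
      · have hunf : pvFill board color (f + 1) x y v = v := by
          simp only [pvFill]
          rw [if_neg h]
        rw [hunf] at ha
        exact hv a ha

-- ===== VERDICT (by name: the statement is the Claim_ definition above) =====
theorem pop_candy_spec : Claim_equal_pop_candy := by
  intro start board totalvisit _hdom _hpre
  unfold Spec_pop_candy
  cases h : pvCell board start.1 start.2 with
  | none =>
      simp [pop_candy, pop_candy_alt, h]
  | some color =>
      simp only [pop_candy, pop_candy_alt, h]
      -- characterise A's visited set
      have hcardS := card_pvS_le board color
      have hv0nd : (PySem.Set.ofList [start] : PySem.Set (Int × Int)).Nodup :=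
        PySem.Set.nodup_ofList _
      have hv0mem : ∀ a, a ∈ (PySem.Set.ofList [start] : PySem.Set (Int × Int)) ↔ a = start := by
        intro a
        rw [PySem.Set.mem_ofList]
        simp
      obtain ⟨G1, G2, G3, G4⟩ := pvBfs_main board color 100 [start] (PySem.Set.ofList [start])
        hv0nd
        (by intro a ha; rw [hv0mem]; simpa using ha)
        (by intro a ha; exact Or.inl (by rw [hv0mem] at ha; simp [ha]))
        (by
          have : (pvS board color \ (PySem.Set.ofList [start] :
              PySem.Set (Int × Int)).toFinset).card ≤ (pvS board color).card :=
            Finset.card_le_card (Finset.sdiff_subset)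
          simp only [List.length_singleton]
          omega)
      set Vb := pvBfsLoop board color 100 [start] (PySem.Set.ofList [start]) with hVb
      have hchar_b : ∀ a, a ∈ Vb ↔ pvReach board color start a := by
        intro a
        constructor
        · intro ha
          refine pvBfs_sound board color start 100 [start] (PySem.Set.ofList [start]) ?_ ?_ a ha
          · intro b hb
            simp only [List.mem_singleton] at hb
            subst hb
            exact pvReach.base
          · intro b hb
            rw [hv0mem] at hb
            subst hb
            exact pvReach.base
        · intro ha
          induction ha with
          | base => exact G1 start ((hv0mem start).mpr rfl)
          | step hc hn hg ih => exact G4 _ ih _ hn hg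
      -- characterise B's visited set
      have hv0card : (pvS board color \ (PySem.Set.ofList [start] :
          PySem.Set (Int × Int)).toFinset).card < 37 := by
        have : (pvS board color \ (PySem.Set.ofList [start] :
            PySem.Set (Int × Int)).toFinset).card ≤ (pvS board color).card :=
          Finset.card_le_card (Finset.sdiff_subset)
        omega
      obtain ⟨A1, A2, A3, A4, A5⟩ := pvFill_main board color 37 start.1 (start.2 - 1)
        (PySem.Set.ofList [start]) hv0nd hv0card
      set w1 := pvFill board color 37 start.1 (start.2 - 1) (PySem.Set.ofList [start]) with hw1
      obtain ⟨B1, B2, B3, B4, B5⟩ := pvFill_main board color 37 start.1 (start.2 + 1) w1 A2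
        (lt_of_le_of_lt (pv_card_mono board color _ w1 A1) hv0card)
      set w2 := pvFill board color 37 start.1 (start.2 + 1) w1 with hw2
      obtain ⟨C1, C2, C3, C4, C5⟩ := pvFill_main board color 37 (start.1 - 1) start.2 w2 B2
        (lt_of_le_of_lt (pv_card_mono board color _ w2 (fun a ha => B1 a (A1 a ha))) hv0card)
      set w3 := pvFill board color 37 (start.1 - 1) start.2 w2 with hw3
      obtain ⟨D1, D2, D3, D4, D5⟩ := pvFill_main board color 37 (start.1 + 1) start.2 w3 C2
        (lt_of_le_of_lt
          (pv_card_mono board color _ w3 (fun a ha => C1 a (B1 a (A1 a ha)))) hv0card)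
      set w4 := pvFill board color 37 (start.1 + 1) start.2 w3 with hw4
      have hmono0 : ∀ a, a ∈ (PySem.Set.ofList [start] : PySem.Set (Int × Int)) → a ∈ w4 :=
        fun a ha => D1 a (C1 a (B1 a (A1 a ha)))
      have hchar_d : ∀ a, a ∈ w4 ↔ pvReach board color start a := by
        intro a
        constructor
        · intro ha
          have hs0 : ∀ b, b ∈ (PySem.Set.ofList [start] : PySem.Set (Int × Int)) →
              pvReach board color start b := by
            intro b hb
            rw [hv0mem] at hb
            subst hb
            exact pvReach.base
          have hstep : ∀ n, n ∈ pvNbrs start → pvGoodb board color n = true →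
              pvReach board color start n := fun n hn hgn => pvReach.step pvReach.base hn hgn
          have hs1 : ∀ b, b ∈ w1 → pvReach board color start b :=
            pvFill_sound board color start 37 start.1 (start.2 - 1) _ hs0
              (fun hg' => hstep _ ((mem_pvNbrs _ _).mpr (Or.inl rfl)) hg')
          have hs2 : ∀ b, b ∈ w2 → pvReach board color start b :=
            pvFill_sound board color start 37 start.1 (start.2 + 1) _ hs1
              (fun hg' => hstep _ ((mem_pvNbrs _ _).mpr (Or.inr (Or.inl rfl))) hg')
          have hs3 : ∀ b, b ∈ w3 → pvReach board color start b :=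
            pvFill_sound board color start 37 (start.1 - 1) start.2 _ hs2
              (fun hg' => hstep _ ((mem_pvNbrs _ _).mpr (Or.inr (Or.inr (Or.inl rfl)))) hg')
          exact pvFill_sound board color start 37 (start.1 + 1) start.2 _ hs3
            (fun hg' => hstep _ ((mem_pvNbrs _ _).mpr (Or.inr (Or.inr (Or.inr rfl)))) hg') a ha
        · intro ha
          induction ha with
          | base => exact hmono0 start ((hv0mem start).mpr rfl)
          | @step c n hc hn hg ih =>
              by_cases hcs : c = start
              · subst hcs
                rcases (mem_pvNbrs _ n).mp hn with rfl | rfl | rfl | rfl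
                · exact D1 _ (C1 _ (B1 _ (A3 hg)))
                · exact D1 _ (C1 _ (B3 hg))
                · exact D1 _ (C3 hg)
                · exact D3 hg
              · have hc0 : c ∉ (PySem.Set.ofList [start] : PySem.Set (Int × Int)) := by
                  rw [hv0mem]; exact hcs
                by_cases hc1 : c ∈ w1
                · exact D1 _ (C1 _ (B1 _ (A5 c hc1 hc0 n hn hg)))
                · by_cases hc2 : c ∈ w2
                  · exact D1 _ (C1 _ (B5 c hc2 hc1 n hn hg))
                  · by_cases hc3 : c ∈ w3
                    · exact D1 _ (C5 c hc3 hc2 n hn hg)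
                    · exact D5 c ih hc3 n hn hg
      -- the two visited sets are permutations, hence equal length
      have hperm : Vb.Perm w4 :=
        (List.perm_ext_iff_of_nodup G2 D2).mpr
          (fun a => (hchar_b a).trans (hchar_d a).symm)
      have hlen : Vb.length = w4.length := hperm.length_eq
      rw [PySem.Set.len_eq, PySem.Set.len_eq, hlen]
      by_cases h3 : (3 : Int) ≤ (w4.length : Int)
      · simp [h3, not_lt.mpr h3]
      · simp [h3, lt_of_not_ge h3]
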